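-- pv_equiv track=rewrite | github.com/rodtjarn/cancer_predictor | external_datasets/mimic_iv_demo/analyze_by_cancer_type.py | categorize_cancer
-- ===== SOURCE A (Python) =====
-- cancer_categories = {
--     'Lung Cancer': ['C34'],  # Malignant neoplasm of bronchus and lung
--     'GI Cancer': ['C15', 'C16', 'C17', 'C18', 'C19', 'C20', 'C21', 'C22', 'C23', 'C24', 'C25', 'C26'],  # Digestive organs
--     'Breast Cancer': ['C50'],  # Malignant neoplasm of breast
--     'Prostate Cancer': ['C61'],  # Malignant neoplasm of prostate
--     'Hematologic Cancer': ['C81', 'C82', 'C83', 'C84', 'C85', 'C88', 'C90', 'C91', 'C92', 'C93', 'C94', 'C95'],  # Lymphomas, leukemias, myelomas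
--     'Urologic Cancer': ['C64', 'C65', 'C66', 'C67', 'C68'],  # Kidney, bladder, urinary organs
--     'Gynecologic Cancer': ['C51', 'C52', 'C53', 'C54', 'C55', 'C56', 'C57', 'C58'],  # Female genital organs
--     'Head/Neck Cancer': ['C00', 'C01', 'C02', 'C03', 'C04', 'C05', 'C06', 'C07', 'C08', 'C09', 'C10', 'C11', 'C12', 'C13', 'C14', 'C30', 'C31', 'C32'],  # Oral cavity, pharynx, larynx
--     'Other Cancer': []  # Will be filled with any other C codes
-- }
--
-- def categorize_cancer(icd_code):
--     """Categorize cancer by ICD-10 code"""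
--     for category, prefixes in cancer_categories.items():
--         if category == 'Other Cancer':
--             continue
--         for prefix in prefixes:
--             if icd_code.startswith(prefix):
--                 return category
--     return 'Other Cancer'
-- ===== SOURCE B (Python) =====
-- cancer_categories = {
--     'Lung Cancer': ['C34'],
--     'GI Cancer': ['C15', 'C16', 'C17', 'C18', 'C19', 'C20', 'C21', 'C22', 'C23', 'C24', 'C25', 'C26'],
--     'Breast Cancer': ['C50'],
--     'Prostate Cancer': ['C61'],
--     'Hematologic Cancer': ['C81', 'C82', 'C83', 'C84', 'C85', 'C88', 'C90', 'C91', 'C92', 'C93', 'C94', 'C95'],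
--     'Urologic Cancer': ['C64', 'C65', 'C66', 'C67', 'C68'],
--     'Gynecologic Cancer': ['C51', 'C52', 'C53', 'C54', 'C55', 'C56', 'C57', 'C58'],
--     'Head/Neck Cancer': ['C00', 'C01', 'C02', 'C03', 'C04', 'C05', 'C06', 'C07', 'C08', 'C09', 'C10', 'C11', 'C12', 'C13', 'C14', 'C30', 'C31', 'C32'],
--     'Other Cancer': []
-- }
--
-- def categorize_cancer(icd_code):
--     """Categorize cancer by ICD-10 code"""
--     head = icd_code[:3]
--     if len(head) == 3 and head[0] == 'C' and head[1:].isdigit():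
--         n = int(head[1:])
--         if n == 34:
--             return 'Lung Cancer'
--         if 15 <= n <= 26:
--             return 'GI Cancer'
--         if n == 50:
--             return 'Breast Cancer'
--         if n == 61:
--             return 'Prostate Cancer'
--         if 81 <= n <= 85 or n == 88 or 90 <= n <= 95:
--             return 'Hematologic Cancer'
--         if 64 <= n <= 68:
--             return 'Urologic Cancer'
--         if 51 <= n <= 58:
--             return 'Gynecologic Cancer'
--         if n <= 14 or 30 <= n <= 32:
--             return 'Head/Neck Cancer'
--     return 'Other Cancer'
-- ===== Notes on version B (the rewrite author's own statement) =====
-- stated objective: alternative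
-- what changed: Replaced the nested scan over the category->prefix-list table by numeric range classification: parse the two digits following the leading letter of icd_code[:3] into an integer and decide the category with interval comparisons, so the table of 40 prefixes disappears from the lookup path.
import Mathlib
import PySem

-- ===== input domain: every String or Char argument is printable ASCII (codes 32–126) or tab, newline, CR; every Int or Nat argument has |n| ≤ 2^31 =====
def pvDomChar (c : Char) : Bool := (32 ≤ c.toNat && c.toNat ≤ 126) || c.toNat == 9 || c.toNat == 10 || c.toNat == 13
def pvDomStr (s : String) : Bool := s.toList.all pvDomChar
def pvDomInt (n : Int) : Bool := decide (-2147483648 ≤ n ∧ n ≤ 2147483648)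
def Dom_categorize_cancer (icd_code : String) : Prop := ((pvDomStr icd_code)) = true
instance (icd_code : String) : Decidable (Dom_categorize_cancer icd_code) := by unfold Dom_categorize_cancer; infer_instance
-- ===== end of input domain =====

-- B replaces A's nested scan over the category→prefix-list table by numeric range
-- classification of the two digits following the leading 'C' (alternative algorithm; same value).

-- ===== PORT A =====
-- module-level constant cancer_categories (dict of category → prefix list, in insertion order)
def pvCancerCategories : List (String × List String) := [
  ("Lung Cancer", ["C34"]),
  ("GI Cancer", ["C15", "C16", "C17", "C18", "C19", "C20", "C21", "C22", "C23", "C24", "C25", "C26"]),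
  ("Breast Cancer", ["C50"]),
  ("Prostate Cancer", ["C61"]),
  ("Hematologic Cancer", ["C81", "C82", "C83", "C84", "C85", "C88", "C90", "C91", "C92", "C93", "C94", "C95"]),
  ("Urologic Cancer", ["C64", "C65", "C66", "C67", "C68"]),
  ("Gynecologic Cancer", ["C51", "C52", "C53", "C54", "C55", "C56", "C57", "C58"]),
  ("Head/Neck Cancer", ["C00", "C01", "C02", "C03", "C04", "C05", "C06", "C07", "C08", "C09", "C10", "C11", "C12", "C13", "C14", "C30", "C31", "C32"]),
  ("Other Cancer", [])]

-- inner loop: 'for prefix in prefixes: if icd_code.startswith(prefix): return category'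
def pvInnerLoop (icd_code cat : String) : List String → Option String
  | [] => none
  | pfx :: ps => if PySem.Str.startswith icd_code pfx then some cat else pvInnerLoop icd_code cat ps

-- outer loop: 'for category, prefixes in cancer_categories.items(): if category == "Other Cancer": continue; …'
def pvOuterLoop (icd_code : String) : List (String × List String) → String
  | [] => "Other Cancer"
  | (cat, prefixes) :: rest =>
      if cat == "Other Cancer" then pvOuterLoop icd_code rest
      else
        match pvInnerLoop icd_code cat prefixes with
        | some c => c
        | none => pvOuterLoop icd_code rest

def categorize_cancer (icd_code : String) : String :=
  pvOuterLoop icd_code pvCancerCategories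

-- ===== PORT B =====
-- head = icd_code[:3]; if len(head)==3 and head[0]=='C' and head[1:].isdigit(): n = int(head[1:]); range checks
def categorize_cancer_alt (icd_code : String) : String :=
  let head := PySem.Str.slice icd_code none (some 3)
  if PySem.Str.len head == 3 && (PySem.Str.pyGet? head 0 == some 'C')
       && PySem.Str.strIsdigit (PySem.Str.slice head (some 1) none) then
    match PySem.Int.ofStr? (PySem.Str.slice head (some 1) none) with  -- int(head[1:]); the guard makes it 'some'
    | some n =>
        if n == 34 then "Lung Cancer"
        else if 15 ≤ n && n ≤ 26 then "GI Cancer"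
        else if n == 50 then "Breast Cancer"
        else if n == 61 then "Prostate Cancer"
        else if (81 ≤ n && n ≤ 85) || n == 88 || (90 ≤ n && n ≤ 95) then "Hematologic Cancer"
        else if 64 ≤ n && n ≤ 68 then "Urologic Cancer"
        else if 51 ≤ n && n ≤ 58 then "Gynecologic Cancer"
        else if n ≤ 14 || (30 ≤ n && n ≤ 32) then "Head/Neck Cancer"
        else "Other Cancer"
    | none => "Other Cancer"  -- unreachable under the isdigit guard
  else "Other Cancer"

-- ===== PRECONDITION & SPEC =====
def Spec_categorize_cancer (icd_code : String) (out : String) : Prop := out = categorize_cancer_alt icd_code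
instance (icd_code : String) (out : String) : Decidable (Spec_categorize_cancer icd_code out) := by unfold Spec_categorize_cancer; infer_instance

-- ===== CLAIM =====
def Claim_equal_categorize_cancer : Prop := ∀ (icd_code : String), Dom_categorize_cancer icd_code → Spec_categorize_cancer icd_code (categorize_cancer icd_code)

-- ===== LEMMAS AND PROOFS =====

-- first-match lookup chain over char-list keys with an explicit default (proof-side model of A)
def pvLookupC (t : List Char) : List (List Char × String) → String → String
  | [], d => d
  | (k, v) :: r, d => if k = t then v else pvLookupC t r d

-- flattening of A's table into (prefix-chars, category) pairs, skipping the 'Other Cancer' row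
def pvFlatten (cats : List (String × List String)) : List (List Char × String) :=
  cats.foldr (fun c acc => if c.1 == "Other Cancer" then acc else (c.2.map (fun p => (p.toList, c.1))) ++ acc) []

-- A as a function of the first three characters
def pvCatA (t : List Char) : String := pvLookupC t (pvFlatten pvCancerCategories) "Other Cancer"

-- B as a function of the first three characters
def pvCatB (t : List Char) : String :=
  if (t.length : Int) == 3 && (t[0]? == some 'C') && PySem.Chars.strIsdigit t.tail then
    match PySem.Int.ofChars? t.tail with
    | some n =>
        if n == 34 then "Lung Cancer"
        else if 15 ≤ n && n ≤ 26 then "GI Cancer"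
        else if n == 50 then "Breast Cancer"
        else if n == 61 then "Prostate Cancer"
        else if (81 ≤ n && n ≤ 85) || n == 88 || (90 ≤ n && n ≤ 95) then "Hematologic Cancer"
        else if 64 ≤ n && n ≤ 68 then "Urologic Cancer"
        else if 51 ≤ n && n ≤ 58 then "Gynecologic Cancer"
        else if n ≤ 14 || (30 ≤ n && n ≤ 32) then "Head/Neck Cancer"
        else "Other Cancer"
    | none => "Other Cancer"
  else "Other Cancer"

theorem pvFlatten_lit : pvFlatten pvCancerCategories = [
  (['C','3','4'], "Lung Cancer"),
  (['C','1','5'], "GI Cancer"),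
  (['C','1','6'], "GI Cancer"),
  (['C','1','7'], "GI Cancer"),
  (['C','1','8'], "GI Cancer"),
  (['C','1','9'], "GI Cancer"),
  (['C','2','0'], "GI Cancer"),
  (['C','2','1'], "GI Cancer"),
  (['C','2','2'], "GI Cancer"),
  (['C','2','3'], "GI Cancer"),
  (['C','2','4'], "GI Cancer"),
  (['C','2','5'], "GI Cancer"),
  (['C','2','6'], "GI Cancer"),
  (['C','5','0'], "Breast Cancer"),
  (['C','6','1'], "Prostate Cancer"),
  (['C','8','1'], "Hematologic Cancer"),
  (['C','8','2'], "Hematologic Cancer"),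
  (['C','8','3'], "Hematologic Cancer"),
  (['C','8','4'], "Hematologic Cancer"),
  (['C','8','5'], "Hematologic Cancer"),
  (['C','8','8'], "Hematologic Cancer"),
  (['C','9','0'], "Hematologic Cancer"),
  (['C','9','1'], "Hematologic Cancer"),
  (['C','9','2'], "Hematologic Cancer"),
  (['C','9','3'], "Hematologic Cancer"),
  (['C','9','4'], "Hematologic Cancer"),
  (['C','9','5'], "Hematologic Cancer"),
  (['C','6','4'], "Urologic Cancer"),
  (['C','6','5'], "Urologic Cancer"),
  (['C','6','6'], "Urologic Cancer"),
  (['C','6','7'], "Urologic Cancer"),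
  (['C','6','8'], "Urologic Cancer"),
  (['C','5','1'], "Gynecologic Cancer"),
  (['C','5','2'], "Gynecologic Cancer"),
  (['C','5','3'], "Gynecologic Cancer"),
  (['C','5','4'], "Gynecologic Cancer"),
  (['C','5','5'], "Gynecologic Cancer"),
  (['C','5','6'], "Gynecologic Cancer"),
  (['C','5','7'], "Gynecologic Cancer"),
  (['C','5','8'], "Gynecologic Cancer"),
  (['C','0','0'], "Head/Neck Cancer"),
  (['C','0','1'], "Head/Neck Cancer"),
  (['C','0','2'], "Head/Neck Cancer"),
  (['C','0','3'], "Head/Neck Cancer"),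
  (['C','0','4'], "Head/Neck Cancer"),
  (['C','0','5'], "Head/Neck Cancer"),
  (['C','0','6'], "Head/Neck Cancer"),
  (['C','0','7'], "Head/Neck Cancer"),
  (['C','0','8'], "Head/Neck Cancer"),
  (['C','0','9'], "Head/Neck Cancer"),
  (['C','1','0'], "Head/Neck Cancer"),
  (['C','1','1'], "Head/Neck Cancer"),
  (['C','1','2'], "Head/Neck Cancer"),
  (['C','1','3'], "Head/Neck Cancer"),
  (['C','1','4'], "Head/Neck Cancer"),
  (['C','3','0'], "Head/Neck Cancer"),
  (['C','3','1'], "Head/Neck Cancer"),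
  (['C','3','2'], "Head/Neck Cancer")] := by decide

-- For a 3-character prefix p, icd_code.startswith(p) decides p.toList = first three chars.
theorem pvStartswith_take3 (s p : String) (hp : p.toList.length = 3) :
    PySem.Str.startswith s p = decide (p.toList = s.toList.take 3) := by
  rw [Bool.eq_iff_iff, PySem.Str.startswith_eq, PySem.Chars.startswith_iff, decide_eq_true_iff,
      List.prefix_iff_eq_take, hp]

theorem pvLookupC_append (t : List Char) (xs ys : List (List Char × String)) (d : String) :
    pvLookupC t (xs ++ ys) d = pvLookupC t xs (pvLookupC t ys d) := by
  induction xs with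
  | nil => rfl
  | cons hd tl ih => cases hd with | mk k v => simp only [List.cons_append, pvLookupC, ih]

theorem pvInner_eq (icd cat r : String) (ps : List String)
    (h3 : ∀ p ∈ ps, p.toList.length = 3) :
    (match pvInnerLoop icd cat ps with
     | some c => c
     | none => r)
      = pvLookupC (icd.toList.take 3) (ps.map (fun p => (p.toList, cat))) r := by
  induction ps with
  | nil => rfl
  | cons p ps ih =>
      have hp := h3 p (List.mem_cons_self ..)
      rw [List.map_cons]
      simp only [pvInnerLoop, pvLookupC, pvStartswith_take3 icd p hp]
      by_cases hc : p.toList = icd.toList.take 3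
      · simp [hc]
      · simp [hc, ih (fun q hq => h3 q (List.mem_cons_of_mem _ hq))]

theorem pvOuter_eq (icd : String) (cats : List (String × List String))
    (h3 : ∀ c ∈ cats, ∀ p ∈ c.2, p.toList.length = 3) :
    pvOuterLoop icd cats = pvLookupC (icd.toList.take 3) (pvFlatten cats) "Other Cancer" := by
  induction cats with
  | nil => rfl
  | cons c rest ih =>
      cases c with
      | mk cat ps =>
        have ih' := ih (fun c hc => h3 c (List.mem_cons_of_mem _ hc))
        simp only [pvOuterLoop, pvFlatten, List.foldr_cons]
        by_cases hcat : (cat == "Other Cancer") = true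
        · simp only [hcat, if_true, ih']; rfl
        · simp only [Bool.not_eq_true] at hcat
          rw [if_neg (by simp [hcat]), if_neg (by simp [hcat])]
          rw [pvInner_eq icd cat _ ps (h3 (cat, ps) (List.mem_cons_self ..)), ih']
          exact (pvLookupC_append _ _ _ _).symm

theorem pvCatA_spec (icd : String) : categorize_cancer icd = pvCatA (icd.toList.take 3) :=
  pvOuter_eq icd pvCancerCategories (by decide)

theorem pvCatB_spec (icd : String) : categorize_cancer_alt icd = pvCatB (icd.toList.take 3) := by
  have htl : (PySem.Str.slice icd none (some 3)).toList = icd.toList.take 3 := by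
    rw [PySem.Str.toList_slice, PySem.Chars.slice_eq_listSlice, PySem.List.slice_to _ (by norm_num)]
    simp
  have htail : (PySem.Str.slice (PySem.Str.slice icd none (some 3)) (some 1) none).toList
      = (icd.toList.take 3).tail := by
    rw [PySem.Str.toList_slice, PySem.Chars.slice_eq_listSlice, htl, PySem.List.slice_from_one]
  have hparse : PySem.Int.ofStr? (PySem.Str.slice (PySem.Str.slice icd none (some 3)) (some 1) none)
      = PySem.Int.ofChars? (icd.toList.take 3).tail := by
    rw [← htail]; simp [PySem.Int.ofStr?]
  have hget : PySem.Str.pyGet? (PySem.Str.slice icd none (some 3)) 0 = (icd.toList.take 3)[0]? := by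
    rw [show (0 : Int) = ((0 : Nat) : Int) from rfl, PySem.Str.pyGet?_natCast, htl]
  simp only [categorize_cancer_alt, pvCatB, PySem.Str.len_eq, PySem.Str.strIsdigit_eq,
    hget, htl, htail, hparse]

theorem pvDigit_enum (b : Char) (h : PySem.Chars.isdigit b = true) :
    b = '0' ∨ b = '1' ∨ b = '2' ∨ b = '3' ∨ b = '4' ∨ b = '5' ∨ b = '6' ∨ b = '7' ∨ b = '8' ∨ b = '9' := by
  simp only [PySem.Chars.isdigit, Bool.and_eq_true, decide_eq_true_iff] at h
  obtain ⟨h1, h2⟩ := h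
  have hv1 : 48 ≤ b.toNat := h1
  have hv2 : b.toNat ≤ 57 := h2
  have hb : b = Char.ofNat b.toNat := (Char.ofNat_toNat b).symm
  have : b.toNat = 48 ∨ b.toNat = 49 ∨ b.toNat = 50 ∨ b.toNat = 51 ∨ b.toNat = 52 ∨ b.toNat = 53
      ∨ b.toNat = 54 ∨ b.toNat = 55 ∨ b.toNat = 56 ∨ b.toNat = 57 := by omega
  rcases this with h|h|h|h|h|h|h|h|h|h <;> rw [h] at hb <;> rw [hb] <;> decide

theorem pvNotDigit_ne (b d : Char) (hd : PySem.Chars.isdigit d = true)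
    (hb : PySem.Chars.isdigit b = false) : (d = b) = False := by
  apply eq_false
  rintro rfl
  rw [hd] at hb
  exact Bool.noConfusion hb

set_option maxRecDepth 8192 in
theorem pvCat_eq (t : List Char) (h : t.length ≤ 3) : pvCatA t = pvCatB t := by
  rcases t with _ | ⟨a, _ | ⟨b, _ | ⟨c, _ | ⟨d, t⟩⟩⟩⟩
  · decide
  · simp [pvCatA, pvFlatten_lit, pvLookupC, pvCatB]
  · simp [pvCatA, pvFlatten_lit, pvLookupC, pvCatB]
  · by_cases ha : a = 'C'
    · subst ha
      by_cases hb : PySem.Chars.isdigit b = true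
      · by_cases hc : PySem.Chars.isdigit c = true
        · rcases pvDigit_enum b hb with rfl|rfl|rfl|rfl|rfl|rfl|rfl|rfl|rfl|rfl <;>
            rcases pvDigit_enum c hc with rfl|rfl|rfl|rfl|rfl|rfl|rfl|rfl|rfl|rfl <;> decide
        · have hc' : PySem.Chars.isdigit c = false := by simpa using hc
          have e0 := pvNotDigit_ne c '0' (by decide) hc'
          have e1 := pvNotDigit_ne c '1' (by decide) hc'
          have e2 := pvNotDigit_ne c '2' (by decide) hc'
          have e3 := pvNotDigit_ne c '3' (by decide) hc'
          have e4 := pvNotDigit_ne c '4' (by decide) hc'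
          have e5 := pvNotDigit_ne c '5' (by decide) hc'
          have e6 := pvNotDigit_ne c '6' (by decide) hc'
          have e7 := pvNotDigit_ne c '7' (by decide) hc'
          have e8 := pvNotDigit_ne c '8' (by decide) hc'
          have e9 := pvNotDigit_ne c '9' (by decide) hc'
          simp [pvCatA, pvFlatten_lit, pvLookupC, pvCatB, PySem.Chars.strIsdigit, hc',
            e0, e1, e2, e3, e4, e5, e6, e7, e8, e9]
      · have hb' : PySem.Chars.isdigit b = false := by simpa using hb
        have e0 := pvNotDigit_ne b '0' (by decide) hb'
        have e1 := pvNotDigit_ne b '1' (by decide) hb'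
        have e2 := pvNotDigit_ne b '2' (by decide) hb'
        have e3 := pvNotDigit_ne b '3' (by decide) hb'
        have e5 := pvNotDigit_ne b '5' (by decide) hb'
        have e6 := pvNotDigit_ne b '6' (by decide) hb'
        have e8 := pvNotDigit_ne b '8' (by decide) hb'
        have e9 := pvNotDigit_ne b '9' (by decide) hb'
        simp [pvCatA, pvFlatten_lit, pvLookupC, pvCatB, PySem.Chars.strIsdigit, hb',
          e0, e1, e2, e3, e5, e6, e8, e9]
    · have ha' : ('C' = a) = False := eq_false fun e => ha e.symm
      simp [pvCatA, pvFlatten_lit, pvLookupC, pvCatB, ha, ha']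
  · simp at h; omega

-- ===== VERDICT =====
theorem categorize_cancer_spec : Claim_equal_categorize_cancer := by
  intro icd _
  unfold Spec_categorize_cancer
  rw [pvCatA_spec, pvCatB_spec, pvCat_eq _ (by simp)]
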